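-- pv_equiv track=rewrite | github.com/kimj0ngw0n/TIL | 01_interface/01_algorithms/programmers/hash_의상_옛날내풀이.py | solution
-- ===== SOURCE A (Python) =====
-- def solution(clothes):
--     names = set()
--     for cloth in clothes:
--         names.add(cloth[1])
--
--     num = dict()
--     for cloth in clothes:
--         name = cloth[1]
--         if name in num.keys():
--             num[name] += 1
--         else:
--             num[name] = 2
--
--     answer = 1
--     for key in num.keys():
--         answer *= num[key]
--     answer -= 1
--
--     return answer
-- ===== SOURCE B (Python) =====
-- def solution(clothes):
--     cats = sorted(cloth[1] for cloth in clothes)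
--     if not cats:
--         return 0
--     answer = 1
--     run = 1
--     for prev, cur in zip(cats, cats[1:]):
--         if cur == prev:
--             run += 1
--         else:
--             answer *= run + 1
--             run = 1
--     return answer * (run + 1) - 1
-- ===== Notes on version B (the rewrite author's own statement) =====
-- stated objective: alternative
-- what changed: Replaced the dictionary-counting pass (membership test, increment-or-init, then a product over dict values) by sort-then-scan: sort the category names and multiply (run length + 1) over maximal runs of equal names in one linear sweep.
import Mathlib
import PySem

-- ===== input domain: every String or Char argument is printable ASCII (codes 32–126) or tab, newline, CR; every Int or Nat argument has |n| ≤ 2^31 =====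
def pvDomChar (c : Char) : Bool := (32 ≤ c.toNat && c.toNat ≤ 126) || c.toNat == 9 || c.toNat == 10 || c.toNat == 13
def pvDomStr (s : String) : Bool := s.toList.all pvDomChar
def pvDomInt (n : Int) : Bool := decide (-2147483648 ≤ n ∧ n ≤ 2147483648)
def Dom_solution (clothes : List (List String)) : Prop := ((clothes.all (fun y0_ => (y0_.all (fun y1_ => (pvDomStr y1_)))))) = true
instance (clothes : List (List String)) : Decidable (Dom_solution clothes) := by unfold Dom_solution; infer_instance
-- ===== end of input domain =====

-- B replaces A's dictionary-counting pass by sort-then-run-scan (alternative decomposition, no speed claim).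

-- ===== PORT A =====
def solution (clothes : List (List String)) : Int :=
  let _names : PySem.Set String :=
    clothes.foldl (fun s c => PySem.Set.add s ((PySem.List.pyGet? c 1).getD "")) (PySem.Set.ofList [])
  let num : PySem.Dict String Int :=
    clothes.foldl (fun d c =>
      let name := (PySem.List.pyGet? c 1).getD ""
      match d.get? name with
      | some v => d.insert name (v + 1)
      | none => d.insert name 2) PySem.Dict.empty
  let answer : Int := (PySem.Dict.keys num).foldl (fun a k => a * num.getD k 0) 1
  answer - 1

-- ===== PORT B =====
def solution_alt (clothes : List (List String)) : Int :=
  let cats : List String :=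
    PySem.List.sorted (clothes.map (fun c => (PySem.List.pyGet? c 1).getD "")) (fun x => x) false
  match cats with
  | [] => 0
  | _ :: _ =>
    let p : Int × Int := (cats.zip cats.tail).foldl
      (fun (p : Int × Int) (pc : String × String) =>
        if pc.2 == pc.1 then (p.1, p.2 + 1) else (p.1 * (p.2 + 1), 1)) (1, 1)
    p.1 * (p.2 + 1) - 1

-- ===== PRECONDITION & SPEC =====
-- Pre_ excludes exactly the inputs where some cloth has fewer than 2 entries: there cloth[1] raises IndexError in both A and B.
def Pre_solution (clothes : List (List String)) : Prop := ∀ c ∈ clothes, 2 ≤ c.length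
instance (clothes : List (List String)) : Decidable (Pre_solution clothes) := by unfold Pre_solution; infer_instance
def pvWitness_solution : List (List String) := [["a", "shirt"], ["b", "pants"], ["c", "shirt"]]
def Spec_solution (clothes : List (List String)) (out : Int) : Prop := out = solution_alt clothes
instance (clothes : List (List String)) (out : Int) : Decidable (Spec_solution clothes out) := by unfold Spec_solution; infer_instance

-- ===== CLAIM (what is proved, stated in full; the proofs are below) =====
def Claim_equal_solution : Prop := ∀ (clothes : List (List String)), Dom_solution clothes → Pre_solution clothes → Spec_solution clothes (solution clothes)

-- ===== LEMMAS AND PROOFS =====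

-- the common specification both programs compute: product over distinct category names of (count + 1)
def prodSpec (s : List String) : Int :=
  ((PySem.Set.ofList s).map (fun k => (s.count k : Int) + 1)).prod

theorem prodSpec_perm (s t : List String) (h : s.Perm t) : prodSpec s = prodSpec t := by
  unfold prodSpec
  have hp : (PySem.Set.ofList s).Perm (PySem.Set.ofList t) := by
    apply (List.perm_ext_iff_of_nodup (PySem.Set.nodup_ofList s) (PySem.Set.nodup_ofList t)).mpr
    intro x
    simp [PySem.Set.mem_ofList, h.mem_iff]
  have hc : ∀ k, s.count k = t.count k := fun k => h.count_eq k
  calc ((PySem.Set.ofList s).map (fun k => (s.count k : Int) + 1)).prod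
      = ((PySem.Set.ofList s).map (fun k => (t.count k : Int) + 1)).prod := by
        simp only [hc]
    _ = ((PySem.Set.ofList t).map (fun k => (t.count k : Int) + 1)).prod :=
        (hp.map _).prod_eq

theorem prodSpec_cons (y : String) (ys : List String) :
    prodSpec (y :: ys) = ((y :: ys).count y + 1) * prodSpec (ys.filter (· ≠ y)) := by
  unfold prodSpec
  have hynot : y ∉ ys.filter (· ≠ y) := by simp
  have hp : (PySem.Set.ofList (y :: ys)).Perm (y :: PySem.Set.ofList (ys.filter (· ≠ y))) := by
    apply (List.perm_ext_iff_of_nodup (PySem.Set.nodup_ofList _) ?_).mpr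
    · intro x
      by_cases hx : x = y <;> simp [PySem.Set.mem_ofList, hx, List.mem_filter]
    · exact List.nodup_cons.mpr ⟨by simpa [PySem.Set.mem_ofList] using hynot,
        PySem.Set.nodup_ofList _⟩
  rw [(hp.map (fun k => ((y :: ys).count k : Int) + 1)).prod_eq]
  simp only [List.map_cons, List.prod_cons]
  congr 1
  apply congrArg List.prod
  apply List.map_congr_left
  intro k hk
  have hkF : k ∈ ys.filter (· ≠ y) := by
    simpa [PySem.Set.mem_ofList] using hk
  have hky : k ≠ y := by
    have := (List.mem_filter.mp hkF).2; simpa using this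
  have h1 : (y :: ys).count k = ys.count k := by
    simp [Ne.symm hky]
  have h2 : (ys.filter (· ≠ y)).count k = ys.count k :=
    List.count_filter (by simp [hky])
  rw [h1, ← h2]

-- A side: the counting dict maps each name to (count + 1); the product over its keys is prodSpec
theorem getD1_fold (l : List String) (d : PySem.Dict String Int) (v : String) :
    (l.foldl (fun d x => d.insert x (d.getD x 1 + 1)) d).getD v 1 = d.getD v 1 + l.count v := by
  induction l generalizing d with
  | nil => simp
  | cons h t ih =>
    simp only [List.foldl_cons, ih, PySem.Dict.getD_insert, List.count_cons]
    by_cases hv : v = h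
    · simp [hv]; ring
    · simp [hv]; exact fun e => hv e.symm

theorem solution_eq_prodSpec (clothes : List (List String)) :
    solution clothes = prodSpec (clothes.map (fun c => (PySem.List.pyGet? c 1).getD "")) - 1 := by
  have hstep : clothes.foldl (fun (d : PySem.Dict String Int) c =>
      let name := (PySem.List.pyGet? c 1).getD ""
      match d.get? name with
      | some v => d.insert name (v + 1)
      | none => d.insert name 2) PySem.Dict.empty
      = (clothes.map (fun c => (PySem.List.pyGet? c 1).getD "")).foldl
          (fun d x => d.insert x (d.getD x 1 + 1)) PySem.Dict.empty := by
    rw [List.foldl_map]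
    apply List.foldl_ext
    intro d c _
    cases hg : d.get? ((PySem.List.pyGet? c 1).getD "") with
    | some v => simp [hg, PySem.Dict.getD_of_get?_eq_some d 1 hg]
    | none => simp [hg, PySem.Dict.getD_of_get?_eq_none d 1 hg]
  show (clothes.foldl (fun (d : PySem.Dict String Int) c =>
      let name := (PySem.List.pyGet? c 1).getD ""
      match d.get? name with
      | some v => d.insert name (v + 1)
      | none => d.insert name 2) PySem.Dict.empty).keys.foldl
        (fun a k => a * (clothes.foldl (fun (d : PySem.Dict String Int) c =>
          let name := (PySem.List.pyGet? c 1).getD ""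
          match d.get? name with
          | some v => d.insert name (v + 1)
          | none => d.insert name 2) PySem.Dict.empty).getD k 0) 1 - 1
      = prodSpec (clothes.map (fun c => (PySem.List.pyGet? c 1).getD "")) - 1
  rw [hstep]
  set cats := clothes.map (fun c => (PySem.List.pyGet? c 1).getD "") with hcats
  set num := cats.foldl (fun (d : PySem.Dict String Int) x => d.insert x (d.getD x 1 + 1)) PySem.Dict.empty with hnum
  have hkeys : num.keys = PySem.Set.ofList cats := by
    rw [hnum, PySem.Dict.keys_foldl_insert]
    simp [PySem.Set.update_nil_left, PySem.Dict.keys_empty]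
  have hgetD : ∀ k ∈ num.keys, num.getD k 0 = (cats.count k : Int) + 1 := by
    intro k hk
    have hc : num.contains k = true := (PySem.Dict.contains_iff_mem_keys num k).mpr hk
    rw [PySem.Dict.contains_eq_isSome_get?] at hc
    obtain ⟨w, hw⟩ := Option.isSome_iff_exists.mp hc
    have h1 : num.getD k 1 = w := PySem.Dict.getD_of_get?_eq_some num 1 hw
    have h0 : num.getD k 0 = w := PySem.Dict.getD_of_get?_eq_some num 0 hw
    have hfold := getD1_fold cats PySem.Dict.empty k
    rw [← hnum, h1, PySem.Dict.getD_empty] at hfold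
    rw [h0, hfold]; ring
  have hprod : num.keys.foldl (fun a k => a * num.getD k 0) 1
      = (num.keys.map (fun k => num.getD k 0)).prod := by
    rw [List.prod_eq_foldl, List.foldl_map]
  rw [hprod, List.map_congr_left hgetD, hkeys]
  rfl

-- B side: the run-scan loop as a recursion, then its value on a sorted list
def Frun : String → Int → List String → Int
  | _, r, [] => r + 1
  | p, r, y :: ys => if y == p then Frun p (r + 1) ys else (r + 1) * Frun y 1 ys

theorem zipfold (t : List String) (p : String) (a r : Int) :
    (((p :: t).zip t).foldl
      (fun (q : Int × Int) (pc : String × String) =>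
        if pc.2 == pc.1 then (q.1, q.2 + 1) else (q.1 * (q.2 + 1), 1)) (a, r)).1
    * ((((p :: t).zip t).foldl
      (fun (q : Int × Int) (pc : String × String) =>
        if pc.2 == pc.1 then (q.1, q.2 + 1) else (q.1 * (q.2 + 1), 1)) (a, r)).2 + 1)
    = a * Frun p r t := by
  induction t generalizing p a r with
  | nil => simp [Frun]
  | cons y ys ih =>
    simp only [List.zip_cons_cons, List.foldl_cons]
    by_cases hyp : y = p
    · subst hyp
      simp only [beq_self_eq_true, if_true]
      rw [ih]
      simp [Frun]
    · have hb : (y == p) = false := by simp [hyp]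
      simp only [hb, Bool.false_eq_true, if_false]
      rw [ih]
      have : Frun p r (y :: ys) = (r + 1) * Frun y 1 ys := by simp [Frun, hb]
      rw [this]; ring

theorem Frun_spec (t : List String) (p : String) (r : Int)
    (h : (p :: t).Pairwise (· ≤ ·)) :
    Frun p r t = (r + t.count p + 1) * prodSpec (t.filter (· ≠ p)) := by
  induction t generalizing p r with
  | nil => simp [Frun, prodSpec]
  | cons y ys ih =>
    by_cases hyp : y = p
    · subst hyp
      have h' : (y :: ys).Pairwise (· ≤ ·) := h.of_cons
      rw [show Frun y r (y :: ys) = Frun y (r + 1) ys by simp [Frun], ih y (r + 1) h']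
      have hc : (y :: ys).count y = ys.count y + 1 := by simp
      have hf : (y :: ys).filter (· ≠ y) = ys.filter (· ≠ y) := by simp
      rw [hc, hf]
      push_cast; ring
    · have hble : (y == p) = false := by simp [hyp]
      have h' : (y :: ys).Pairwise (· ≤ ·) := h.of_cons
      rw [show Frun p r (y :: ys) = (r + 1) * Frun y 1 ys by simp [Frun, hble], ih y 1 h']
      have hpy : p ≤ y := (List.pairwise_cons.mp h).1 y (by simp)
      have hpnot : p ∉ ys := by
        intro hmem
        have hyz : y ≤ p := (List.pairwise_cons.mp h').1 p hmem
        exact hyp (le_antisymm hyz hpy)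
      have hcount : (y :: ys).count p = 0 := by
        simp [List.count_eq_zero, hyp, hpnot]
      have hfilter : (y :: ys).filter (· ≠ p) = y :: ys := by
        apply List.filter_eq_self.mpr
        intro x hx
        rcases List.mem_cons.mp hx with h1 | h1
        · subst h1; simp [Ne.symm, hyp]
        · simp only [ne_eq, decide_eq_true_eq]; intro he; subst he; exact hpnot h1
      rw [hcount, hfilter, prodSpec_cons y ys]
      have hc2 : (y :: ys).count y = ys.count y + 1 := by simp
      rw [hc2]
      push_cast; ring

theorem solution_alt_eq_prodSpec (clothes : List (List String)) :
    solution_alt clothes = prodSpec (clothes.map (fun c => (PySem.List.pyGet? c 1).getD "")) - 1 := by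
  set cats := clothes.map (fun c => (PySem.List.pyGet? c 1).getD "") with hcats
  have hperm : (PySem.List.sorted cats (fun x => x) false).Perm cats :=
    PySem.List.sorted_perm cats (fun x => x) false
  rw [← prodSpec_perm _ _ hperm]
  show (match PySem.List.sorted cats (fun x => x) false with
    | [] => (0 : Int)
    | _ :: _ =>
      let p : Int × Int := ((PySem.List.sorted cats (fun x => x) false).zip
          (PySem.List.sorted cats (fun x => x) false).tail).foldl
        (fun (p : Int × Int) (pc : String × String) =>
          if pc.2 == pc.1 then (p.1, p.2 + 1) else (p.1 * (p.2 + 1), 1)) (1, 1)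
      p.1 * (p.2 + 1) - 1)
    = prodSpec (PySem.List.sorted cats (fun x => x) false) - 1
  have hpw : (PySem.List.sorted cats (fun x => x) false).Pairwise (· ≤ ·) := by
    have := PySem.List.sorted_pairwise cats (fun x => x)
    simpa using this
  cases hcs : PySem.List.sorted cats (fun x => x) false with
  | nil => simp [prodSpec]
  | cons c0 rest =>
    rw [hcs] at hpw
    simp only [List.tail_cons]
    have hz := zipfold rest c0 1 1
    have hF := Frun_spec rest c0 1 hpw
    rw [prodSpec_cons c0 rest]
    have hc : (c0 :: rest).count c0 = rest.count c0 + 1 := by simp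
    rw [hc]
    rw [hz, hF]
    push_cast; ring

-- ===== VERDICT (by name: the statement is the Claim_ definition above) =====
theorem solution_spec : Claim_equal_solution := by
  intro clothes _ _
  unfold Spec_solution
  rw [solution_eq_prodSpec, solution_alt_eq_prodSpec]
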